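-- pv_equiv track=rewrite | github.com/VladEnache7/SEMESTER-5 | FLCD/Laboratories/Lab5/grammar.py | _validate
-- ===== SOURCE A (Python) =====
-- def _validate(non_terminals: set[str], terminals: set[str], start_symbol: str,
--               productions: dict[str, list[list[str]]]) -> bool:
--     """
--     Validate the grammar's consistency.
--
--     Args:
--         non_terminals (set[str]): The set of non-terminals.
--         terminals (set[str]): The set of terminals.
--         start_symbol (str): The start symbol.
--         productions (dict[str, list[list[str]]]): The production rules.
--
--     Returns:
--         bool: True if the grammar is valid, False otherwise.
--     """
--     # Check if the start symbol is a valid non-terminal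
--     if start_symbol not in non_terminals:
--         return False
--
--     for left_hand_side, right_hand_side_variants in productions.items():
--         # Check if the left-hand side is a valid non-terminal
--         if left_hand_side not in non_terminals:
--             return False
--         # Check if the right-hand side contains only non-terminals and terminals
--         for right_hand_side in right_hand_side_variants:
--             if any(symbol not in non_terminals and symbol not in terminals for symbol in right_hand_side):
--                 return False
--     return True
-- ===== SOURCE B (Python) =====
-- def _sorted_subset(needed, pool):
--     # two-pointer merge subset test over two ascending-sorted lists
--     i = j = 0
--     while i < len(needed):
--         if j == len(pool):
--             return False
--         if pool[j] < needed[i]: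
--             j += 1
--         elif pool[j] == needed[i]:
--             i += 1
--         else:
--             return False
--     return True
--
--
-- def _validate(non_terminals: set[str], terminals: set[str], start_symbol: str,
--               productions: dict[str, list[list[str]]]) -> bool:
--     need_nt = sorted({start_symbol} | set(productions))
--     need_any = sorted({s for variants in productions.values()
--                        for rhs in variants for s in rhs})
--     return (_sorted_subset(need_nt, sorted(non_terminals))
--             and _sorted_subset(need_any, sorted(non_terminals | terminals)))
-- ===== Notes on version B (the rewrite author's own statement) =====
-- stated objective: alternative
-- what changed: Replaces A's hash-membership short-circuit loops with a sort-then-merge algorithm: the required non-terminals (start symbol + LHS keys) and all RHS symbols are collected, sorted, and checked against the sorted symbol pools by a two-pointer merge subset test.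
import Mathlib
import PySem

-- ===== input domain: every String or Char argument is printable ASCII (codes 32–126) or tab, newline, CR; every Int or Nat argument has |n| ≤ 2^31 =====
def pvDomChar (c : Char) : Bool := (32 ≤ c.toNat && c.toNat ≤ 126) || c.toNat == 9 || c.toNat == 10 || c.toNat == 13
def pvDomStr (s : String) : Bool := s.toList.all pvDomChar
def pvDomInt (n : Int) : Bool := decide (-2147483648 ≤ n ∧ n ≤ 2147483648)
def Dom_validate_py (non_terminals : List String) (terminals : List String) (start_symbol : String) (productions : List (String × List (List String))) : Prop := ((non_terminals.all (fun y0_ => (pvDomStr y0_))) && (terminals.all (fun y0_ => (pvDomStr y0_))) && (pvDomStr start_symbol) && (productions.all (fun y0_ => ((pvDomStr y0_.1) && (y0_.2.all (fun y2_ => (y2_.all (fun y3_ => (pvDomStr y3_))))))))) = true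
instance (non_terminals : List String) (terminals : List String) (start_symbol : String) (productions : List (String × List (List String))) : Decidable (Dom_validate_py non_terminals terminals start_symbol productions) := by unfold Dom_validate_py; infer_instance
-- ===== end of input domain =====

-- B replaces A's hash-membership short-circuit loops with sort-then-merge: the required symbols are sorted and checked against sorted pools by a two-pointer merge subset test; return value only, same results.


-- ===== PORT A =====
-- early-return loop over the productions: LHS must be a non-terminal, each RHS symbol a known symbol
def validateGo (non_terminals : List String) (terminals : List String) : List (String × List (List String)) → Bool
  | [] => true
  | (lhs, variants) :: rest =>
    if ¬ non_terminals.contains lhs then false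
    else if variants.any (fun rhs => rhs.any (fun s => ¬ non_terminals.contains s ∧ ¬ terminals.contains s)) then false
    else validateGo non_terminals terminals rest

def validate_py (non_terminals : List String) (terminals : List String) (start_symbol : String) (productions : List (String × List (List String))) : Bool :=
  if ¬ non_terminals.contains start_symbol then false
  else validateGo non_terminals terminals productions

-- ===== PORT B =====
-- B's two-pointer merge subset test over two ascending-sorted lists (the index pair i/j becomes the pair of list suffixes)
def sortedSubset (needed pool : List String) : Bool :=
  match needed, pool with
  | [], _ => true
  | _ :: _, [] => false
  | s :: ns, p :: ps =>
    if p < s then sortedSubset (s :: ns) ps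
    else if p == s then sortedSubset ns (p :: ps)
    else false
termination_by needed.length + pool.length

-- B: collect and sort the required non-terminals and the RHS symbols, then two merge subset tests
def validate_py_alt (non_terminals : List String) (terminals : List String) (start_symbol : String) (productions : List (String × List (List String))) : Bool :=
  let need_nt := PySem.List.sorted (PySem.Set.union (PySem.Set.ofList [start_symbol]) (PySem.Set.ofList (productions.map (·.1)))) (fun x => x) false
  let need_any := PySem.List.sorted (PySem.Set.ofList (productions.flatMap (fun p => p.2.flatMap (fun rhs => rhs)))) (fun x => x) false
  sortedSubset need_nt (PySem.List.sorted non_terminals (fun x => x) false)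
    && sortedSubset need_any (PySem.List.sorted (PySem.Set.union (PySem.Set.ofList non_terminals) terminals) (fun x => x) false)

-- ===== PRECONDITION & SPEC =====
def Spec_validate_py (non_terminals : List String) (terminals : List String) (start_symbol : String) (productions : List (String × List (List String))) (out : Bool) : Prop := out = validate_py_alt non_terminals terminals start_symbol productions
instance (non_terminals : List String) (terminals : List String) (start_symbol : String) (productions : List (String × List (List String))) (out : Bool) : Decidable (Spec_validate_py non_terminals terminals start_symbol productions out) := by unfold Spec_validate_py; infer_instance

-- ===== CLAIM (what is proved, stated in full; the proofs are below) =====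
def Claim_equal_validate_py : Prop := ∀ (non_terminals : List String) (terminals : List String) (start_symbol : String) (productions : List (String × List (List String))), Dom_validate_py non_terminals terminals start_symbol productions → Spec_validate_py non_terminals terminals start_symbol productions (validate_py non_terminals terminals start_symbol productions)

-- ===== LEMMAS AND PROOFS =====
-- The merge subset test on two ascending lists decides membership-subset.
theorem sortedSubset_iff (needed pool : List String)
    (hn : needed.Pairwise (· ≤ ·)) (hp : pool.Pairwise (· ≤ ·)) :
    sortedSubset needed pool = true ↔ ∀ x ∈ needed, x ∈ pool := by
  fun_induction sortedSubset needed pool with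
  | case1 pool => simp
  | case2 s ns =>
    refine iff_of_false (by simp) (fun h => ?_)
    exact List.not_mem_nil (h s List.mem_cons_self)
  | case3 s ns p ps hlt ih =>
    rw [ih hn (List.Pairwise.sublist (List.sublist_cons_self p ps) hp)]
    constructor
    · exact fun h x hx => List.mem_cons_of_mem p (h x hx)
    · intro h x hx
      rcases List.mem_cons.mp (h x hx) with rfl | hxp
      · rcases List.mem_cons.mp hx with rfl | hx'
        · exact absurd hlt (lt_irrefl x)
        · exact absurd hlt (not_lt.mpr ((List.pairwise_cons.mp hn).1 x hx'))
      · exact hxp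
  | case4 s ns p ps hlt heq ih =>
    have hps : p = s := by simpa using heq
    subst hps
    rw [ih (List.Pairwise.sublist (List.sublist_cons_self p ns) hn) hp]
    constructor
    · intro h x hx
      rcases List.mem_cons.mp hx with rfl | hx'
      · exact List.mem_cons_self
      · exact h x hx'
    · exact fun h x hx => h x (List.mem_cons_of_mem p hx)
  | case5 s ns p ps hlt heq =>
    have hne : p ≠ s := fun h => heq (by simp [h])
    have hsp : s < p := lt_of_le_of_ne (not_lt.mp hlt) (Ne.symm hne)
    refine iff_of_false (by simp) (fun h => ?_)
    rcases List.mem_cons.mp (h s List.mem_cons_self) with rfl | hs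
    · exact absurd hsp (lt_irrefl s)
    · exact absurd (lt_of_lt_of_le hsp ((List.pairwise_cons.mp hp).1 s hs)) (lt_irrefl s)

-- A's loop returns true exactly when every production has a non-terminal LHS and only known RHS symbols.
theorem validateGo_iff (nts ts : List String) (prods : List (String × List (List String))) :
    validateGo nts ts prods = true ↔
      ∀ p ∈ prods, p.1 ∈ nts ∧ ∀ rhs ∈ p.2, ∀ s ∈ rhs, s ∈ nts ∨ s ∈ ts := by
  induction prods with
  | nil => simp [validateGo]
  | cons p rest ih =>
    obtain ⟨lhs, variants⟩ := p
    rw [List.forall_mem_cons]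
    simp only [validateGo]
    split_ifs with h1 h2
    · simp only [List.any_eq_true, decide_eq_true_eq, List.contains_iff_mem] at h2
      obtain ⟨rhs, hrhs, sym, hsym, hn, ht⟩ := h2
      simp only [false_iff]
      rintro ⟨⟨-, hall⟩, -⟩
      rcases hall rhs hrhs sym hsym with h | h
      · exact hn h
      · exact ht h
    · simp only [List.contains_iff_mem] at h1
      simp only [List.any_eq_true, decide_eq_true_eq, List.contains_iff_mem,
        not_exists, not_and, not_not] at h2
      have hv : ∀ rhs ∈ variants, ∀ s ∈ rhs, s ∈ nts ∨ s ∈ ts := by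
        intro r hr x hx
        by_cases hxn : x ∈ nts
        · exact Or.inl hxn
        · exact Or.inr (h2 r hr x hx hxn)
      rw [ih]
      exact ⟨fun h => ⟨⟨h1, hv⟩, h⟩, fun h => h.2⟩
    · simp only [List.contains_iff_mem] at h1
      simp [h1]

-- B returns true under exactly the same condition, via its merge subset tests.
theorem validate_py_alt_iff (nts ts : List String) (ss : String)
    (prods : List (String × List (List String))) :
    validate_py_alt nts ts ss prods = true ↔
      (ss ∈ nts ∧ ∀ p ∈ prods, p.1 ∈ nts) ∧
        ∀ p ∈ prods, ∀ rhs ∈ p.2, ∀ s ∈ rhs, s ∈ nts ∨ s ∈ ts := by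
  simp only [validate_py_alt, Bool.and_eq_true]
  rw [sortedSubset_iff _ _ (PySem.List.sorted_pairwise _ _) (PySem.List.sorted_pairwise _ _),
    sortedSubset_iff _ _ (PySem.List.sorted_pairwise _ _) (PySem.List.sorted_pairwise _ _)]
  simp only [PySem.List.mem_sorted, PySem.Set.mem_union, PySem.Set.mem_ofList,
    List.mem_singleton, List.mem_map, List.mem_flatMap]
  constructor
  · rintro ⟨h1, h2⟩
    refine ⟨⟨h1 ss (Or.inl rfl), fun p hp => h1 p.1 (Or.inr ⟨p, hp, rfl⟩)⟩, ?_⟩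
    intro p hp rhs hrhs s hs
    rcases h2 s ⟨p, hp, rhs, hrhs, hs⟩ with h | h
    · exact Or.inl h
    · exact Or.inr h
  · rintro ⟨⟨h0, h1⟩, h2⟩
    refine ⟨?_, ?_⟩
    · rintro x (rfl | ⟨p, hp, rfl⟩)
      · exact h0
      · exact h1 p hp
    · rintro x ⟨p, hp, rhs, hrhs, hx⟩
      rcases h2 p hp rhs hrhs x hx with h | h
      · exact Or.inl h
      · exact Or.inr h

-- ===== VERDICT (by name: the statement is the Claim_ definition above) =====
theorem validate_py_spec : Claim_equal_validate_py := by
  intro nts ts ss prods _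
  unfold Spec_validate_py
  rw [Bool.eq_iff_iff, validate_py_alt_iff]
  unfold validate_py
  split_ifs with h1
  · simp only [List.contains_iff_mem] at h1
    rw [validateGo_iff]
    constructor
    · intro h
      exact ⟨⟨h1, fun p hp => (h p hp).1⟩, fun p hp => (h p hp).2⟩
    · rintro ⟨⟨-, hl⟩, hr⟩ p hp
      exact ⟨hl p hp, hr p hp⟩
  · simp only [List.contains_iff_mem] at h1
    refine iff_of_false (by simp) ?_
    rintro ⟨⟨h0, -⟩, -⟩
    exact h1 h0
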